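-- pv_equiv track=rewrite | github.com/Debashishroy01/astc1.0 | backend/agents/test_generation.py | _assess_coverage_completeness
-- ===== SOURCE A (Python) =====
-- from typing import Dict, List, Any, Optional
--
-- def _assess_coverage_completeness(test_cases: List[Dict[str, Any]], transactions: List[Dict[str, Any]]) -> str:
--     """Assess completeness of test coverage"""
--     if not test_cases:
--         return "None"
--
--     has_positive = any(tc["test_type"] == "functional" for tc in test_cases)
--     has_negative = any(tc["test_type"] == "negative" for tc in test_cases)
--     has_security = any(tc["test_type"] == "security" for tc in test_cases)
--
--     coverage_score = sum([has_positive, has_negative, has_security])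
--
--     if coverage_score >= 3:
--         return "Comprehensive"
--     elif coverage_score >= 2:
--         return "Good"
--     elif coverage_score >= 1:
--         return "Basic"
--     else:
--         return "Minimal"
-- ===== SOURCE B (Python) =====
-- def _assess_coverage_completeness(test_cases, transactions):
--     """Assess completeness of test coverage (single pass over a set of seen types)."""
--     if not test_cases:
--         return "None"
--     required = ("functional", "negative", "security")
--     seen = set()
--     for tc in test_cases:
--         seen.add(tc["test_type"])
--         if all(t in seen for t in required):
--             break
--     coverage_score = sum(t in seen for t in required)
--     if coverage_score >= 3:
--         return "Comprehensive"
--     elif coverage_score >= 2: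
--         return "Good"
--     elif coverage_score >= 1:
--         return "Basic"
--     else:
--         return "Minimal"
-- ===== Notes on version B (the rewrite author's own statement) =====
-- stated objective: alternative
-- what changed: B replaces A's three separate any-scans over test_cases (one per test type) by a single pass that accumulates the seen test types in a set, breaking as soon as all three required types are present, and derives the score from set membership.
import Mathlib
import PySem

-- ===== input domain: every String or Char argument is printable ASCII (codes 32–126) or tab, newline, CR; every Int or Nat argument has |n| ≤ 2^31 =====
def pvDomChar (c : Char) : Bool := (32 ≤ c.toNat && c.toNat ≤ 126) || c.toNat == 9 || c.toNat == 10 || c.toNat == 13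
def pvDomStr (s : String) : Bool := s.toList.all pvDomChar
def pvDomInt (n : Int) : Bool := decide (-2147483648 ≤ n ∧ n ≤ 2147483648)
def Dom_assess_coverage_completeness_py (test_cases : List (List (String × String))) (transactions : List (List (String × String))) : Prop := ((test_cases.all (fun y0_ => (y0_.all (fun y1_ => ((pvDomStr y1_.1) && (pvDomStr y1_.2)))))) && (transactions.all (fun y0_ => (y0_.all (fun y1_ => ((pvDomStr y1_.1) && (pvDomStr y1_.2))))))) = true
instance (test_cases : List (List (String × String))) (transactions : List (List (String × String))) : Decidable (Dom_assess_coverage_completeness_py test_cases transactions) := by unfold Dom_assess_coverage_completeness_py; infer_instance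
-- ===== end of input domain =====

-- ===== PORT A =====
-- One line: B replaces A's three separate any-scans by a single pass collecting seen test types in a set.
-- shared primitive: tc["test_type"] on an association-list dict = first-match lookup (none = KeyError)
def pvLookupTT (tc : List (String × String)) : Option String := tc.lookup "test_type"

def assess_coverage_completeness_py (test_cases : List (List (String × String))) (transactions : List (List (String × String))) : String :=
  if test_cases.isEmpty then "None" else
  let has_positive := test_cases.any (fun tc => pvLookupTT tc == some "functional")
  let has_negative := test_cases.any (fun tc => pvLookupTT tc == some "negative")
  let has_security := test_cases.any (fun tc => pvLookupTT tc == some "security")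
  let coverage_score : Int := (if has_positive then 1 else 0) + (if has_negative then 1 else 0) + (if has_security then 1 else 0)
  if coverage_score >= 3 then "Comprehensive"
  else if coverage_score >= 2 then "Good"
  else if coverage_score >= 1 then "Basic"
  else "Minimal"

-- ===== PORT B =====
def pvRequired : List String := ["functional", "negative", "security"]

-- the single for-loop of Source B: add each test type to `seen`, break once all required types are present
def pvSeenLoop : List (List (String × String)) → PySem.Set String → PySem.Set String
  | [], seen => seen
  | tc :: rest, seen =>
    let seen' := match pvLookupTT tc with
      | some t => PySem.Set.add seen t
      | none => seen           -- Python raises KeyError here; such inputs are outside Pre_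
    if pvRequired.all (fun t => PySem.Set.contains seen' t) then seen'
    else pvSeenLoop rest seen'

def assess_coverage_completeness_py_alt (test_cases : List (List (String × String))) (transactions : List (List (String × String))) : String :=
  if test_cases.isEmpty then "None" else
  let seen := pvSeenLoop test_cases PySem.Set.empty
  let coverage_score : Int := (pvRequired.map (fun t => if PySem.Set.contains seen t then (1 : Int) else 0)).sum
  if coverage_score >= 3 then "Comprehensive"
  else if coverage_score >= 2 then "Good"
  else if coverage_score >= 1 then "Basic"
  else "Minimal"

-- ===== PRECONDITION & SPEC =====
-- Pre_ excludes exactly the inputs where Python A raises KeyError: some test case lacks the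
-- "test_type" key and not all three required types occur strictly before it.
def Pre_assess_coverage_completeness_py (test_cases : List (List (String × String))) (transactions : List (List (String × String))) : Prop :=
  ∀ i : Fin test_cases.length, pvLookupTT test_cases[i] = none →
    ∀ t ∈ pvRequired, ∃ j : Fin test_cases.length, j < i ∧ pvLookupTT test_cases[j] = some t
instance (test_cases : List (List (String × String))) (transactions : List (List (String × String))) : Decidable (Pre_assess_coverage_completeness_py test_cases transactions) := by unfold Pre_assess_coverage_completeness_py; infer_instance

def pvWitness_assess_coverage_completeness_py : (List (List (String × String))) × (List (List (String × String))) :=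
  ([[("test_type", "functional")], [("test_type", "negative")]], [])

def Spec_assess_coverage_completeness_py (test_cases : List (List (String × String))) (transactions : List (List (String × String))) (out : String) : Prop := out = assess_coverage_completeness_py_alt test_cases transactions
instance (test_cases : List (List (String × String))) (transactions : List (List (String × String))) (out : String) : Decidable (Spec_assess_coverage_completeness_py test_cases transactions out) := by unfold Spec_assess_coverage_completeness_py; infer_instance

-- ===== CLAIM (what is proved, stated in full; the proofs are below) =====
def Claim_equal_assess_coverage_completeness_py : Prop := ∀ (test_cases : List (List (String × String))) (transactions : List (List (String × String))), Dom_assess_coverage_completeness_py test_cases transactions → Pre_assess_coverage_completeness_py test_cases transactions → Spec_assess_coverage_completeness_py test_cases transactions (assess_coverage_completeness_py test_cases transactions)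

-- ===== LEMMAS AND PROOFS =====
-- the common score-to-string map, as a function of the three coverage bits
def pvStrOf (p n s : Bool) : String :=
  let score : Int := (if p then 1 else 0) + (if n then 1 else 0) + (if s then 1 else 0)
  if score >= 3 then "Comprehensive"
  else if score >= 2 then "Good"
  else if score >= 1 then "Basic"
  else "Minimal"

theorem strBeqComm (u v : String) : (u == v) = (v == u) := by
  cases hx : u == v
  · cases hy : v == u
    · rfl
    · exact absurd (eq_of_beq hy).symm (by simpa using hx)
  · rw [eq_of_beq hx]; simp

lemma contains_add_eq (s : PySem.Set String) (t x : String) :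
    PySem.Set.contains (PySem.Set.add s t) x = (PySem.Set.contains s x || x == t) := by
  simp only [PySem.Set.contains, PySem.Set.add]
  by_cases h : List.contains s t = true
  · rw [if_pos h]
    cases hx : x == t with
    | false => simp
    | true =>
      have : x = t := eq_of_beq hx
      subst this
      simp [List.contains_eq_mem] at h ⊢
      exact h
  · rw [if_neg h, List.contains_append]
    simp only [List.contains_eq_mem, List.mem_singleton]
    cases hx : x == t
    · simp_all
    · simp_all [eq_of_beq hx]

lemma pvBit_true {s : PySem.Set String} {t x : String}
    (h : PySem.Set.contains (PySem.Set.add s t) x = true) (b : Bool) :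
    (PySem.Set.contains s x || (t == x || b)) = true := by
  rw [contains_add_eq] at h
  cases hc : PySem.Set.contains s x with
  | true => simp
  | false =>
    rw [hc] at h
    simp only [Bool.false_or] at h
    have : x = t := eq_of_beq h
    subst this
    simp

lemma pvSeenLoop_str (l : List (List (String × String))) :
    ∀ seen : PySem.Set String,
    pvStrOf (PySem.Set.contains (pvSeenLoop l seen) "functional")
            (PySem.Set.contains (pvSeenLoop l seen) "negative")
            (PySem.Set.contains (pvSeenLoop l seen) "security")
    = pvStrOf (PySem.Set.contains seen "functional" || l.any (fun tc => pvLookupTT tc == some "functional"))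
              (PySem.Set.contains seen "negative" || l.any (fun tc => pvLookupTT tc == some "negative"))
              (PySem.Set.contains seen "security" || l.any (fun tc => pvLookupTT tc == some "security")) := by
  induction l with
  | nil => intro seen; simp [pvSeenLoop]
  | cons tc rest ih =>
    intro seen
    rw [pvSeenLoop.eq_def]
    cases hv : pvLookupTT tc with
    | none =>
      simp only [hv]
      cases hb : pvRequired.all (fun t => PySem.Set.contains seen t) with
      | true =>
        have h3 := List.all_eq_true.mp hb
        have hf := h3 "functional" (by simp [pvRequired])
        have hn := h3 "negative" (by simp [pvRequired])
        have hs := h3 "security" (by simp [pvRequired])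
        simp only [if_true, hf, hn, hs, Bool.true_or]
      | false =>
        simp only [Bool.false_eq_true, if_false, ih seen, List.any_cons, hv]
        simp
    | some t =>
      simp only [hv]
      cases hb : pvRequired.all (fun u => PySem.Set.contains (PySem.Set.add seen t) u) with
      | true =>
        have h3 := List.all_eq_true.mp hb
        have hf := h3 "functional" (by simp [pvRequired])
        have hn := h3 "negative" (by simp [pvRequired])
        have hs := h3 "security" (by simp [pvRequired])
        simp only [if_true, hf, hn, hs, List.any_cons, hv, Option.some_beq_some,
          pvBit_true hf, pvBit_true hn, pvBit_true hs]
      | false =>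
        simp only [Bool.false_eq_true, if_false, ih (PySem.Set.add seen t),
          List.any_cons, hv, Option.some_beq_some, contains_add_eq]
        rw [strBeqComm "functional" t, strBeqComm "negative" t, strBeqComm "security" t]
        generalize PySem.Set.contains seen "functional" = a1
        generalize PySem.Set.contains seen "negative" = a2
        generalize PySem.Set.contains seen "security" = a3
        generalize (rest.any fun tc => pvLookupTT tc == some "functional") = b1
        generalize (rest.any fun tc => pvLookupTT tc == some "negative") = b2
        generalize (rest.any fun tc => pvLookupTT tc == some "security") = b3
        generalize (t == "functional") = c1
        generalize (t == "negative") = c2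
        generalize (t == "security") = c3
        cases a1 <;> cases a2 <;> cases a3 <;> cases b1 <;> cases b2 <;> cases b3 <;>
          cases c1 <;> cases c2 <;> cases c3 <;> rfl

lemma altStr (seen : PySem.Set String) :
    (let coverage_score : Int := (pvRequired.map (fun t => if PySem.Set.contains seen t then (1 : Int) else 0)).sum
     if coverage_score >= 3 then "Comprehensive"
     else if coverage_score >= 2 then "Good"
     else if coverage_score >= 1 then "Basic"
     else "Minimal")
    = pvStrOf (PySem.Set.contains seen "functional") (PySem.Set.contains seen "negative")
        (PySem.Set.contains seen "security") := by
  cases h1 : PySem.Set.contains seen "functional" <;>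
    cases h2 : PySem.Set.contains seen "negative" <;>
      cases h3 : PySem.Set.contains seen "security" <;>
        simp_all [pvRequired, pvStrOf, PySem.Set.contains, List.contains_eq_mem]

-- ===== VERDICT (by name: the statement is the Claim_ definition above) =====
theorem assess_coverage_completeness_py_spec : Claim_equal_assess_coverage_completeness_py := by
  intro tcs txs _ _
  unfold Spec_assess_coverage_completeness_py
  unfold assess_coverage_completeness_py assess_coverage_completeness_py_alt
  by_cases he : tcs.isEmpty
  · simp only [he, if_true]
  · simp only [he, Bool.false_eq_true, if_false]
    have h := pvSeenLoop_str tcs PySem.Set.empty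
    simp only [show ∀ x : String, PySem.Set.contains PySem.Set.empty x = false from fun _ => rfl,
      Bool.false_or] at h
    show pvStrOf (tcs.any (fun tc => pvLookupTT tc == some "functional"))
        (tcs.any (fun tc => pvLookupTT tc == some "negative"))
        (tcs.any (fun tc => pvLookupTT tc == some "security")) = _
    rw [← h]
    exact (altStr (pvSeenLoop tcs PySem.Set.empty)).symm
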